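-- pv_equiv track=rewrite | github.com/nshah2006/InternApplicationAutomation | ats_field_mapper.py | _get_degree_level
-- ===== SOURCE A (Python) =====
-- from typing import Dict, List, Optional, Tuple, Any, Callable
--
-- def _get_degree_level(degree: Optional[str]) -> int:
--     """
--     Get numeric level for degree (higher = more advanced).
--     Returns: PhD=4, Master=3, Bachelor=2, Associate=1, Other=0
--     """
--     if not degree:
--         return 0
--     degree_lower = degree.lower()
--     if any(term in degree_lower for term in ['phd', 'ph.d', 'doctorate', 'd.phil']):
--         return 4
--     elif any(term in degree_lower for term in ['master', 'm.s', 'm.a', 'mba', 'm.tech']):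
--         return 3
--     elif any(term in degree_lower for term in ['bachelor', 'b.s', 'b.a', 'b.tech', 'b.e']):
--         return 2
--     elif any(term in degree_lower for term in ['associate', 'diploma']):
--         return 1
--     return 0
-- ===== SOURCE B (Python) =====
-- _DEGREE_LEVELS = [
--     ('phd', 4), ('ph.d', 4), ('doctorate', 4), ('d.phil', 4),
--     ('master', 3), ('m.s', 3), ('m.a', 3), ('mba', 3), ('m.tech', 3),
--     ('bachelor', 2), ('b.s', 2), ('b.a', 2), ('b.tech', 2), ('b.e', 2),
--     ('associate', 1), ('diploma', 1),
-- ]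
--
--
-- def _get_degree_level(degree):
--     if not degree:
--         return 0
--     degree_lower = degree.lower()
--     levels = [level for term, level in _DEGREE_LEVELS if term in degree_lower]
--     return max(levels, default=0)
-- ===== Notes on version B (the rewrite author's own statement) =====
-- stated objective: simpler
-- what changed: Replaces the four-rung elif ladder with short-circuiting any() calls by a single flat (term, level) table, one comprehension collecting every matching level, and a max reduction with default 0 (valid because the tiers are in strictly descending order).
import Mathlib
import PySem

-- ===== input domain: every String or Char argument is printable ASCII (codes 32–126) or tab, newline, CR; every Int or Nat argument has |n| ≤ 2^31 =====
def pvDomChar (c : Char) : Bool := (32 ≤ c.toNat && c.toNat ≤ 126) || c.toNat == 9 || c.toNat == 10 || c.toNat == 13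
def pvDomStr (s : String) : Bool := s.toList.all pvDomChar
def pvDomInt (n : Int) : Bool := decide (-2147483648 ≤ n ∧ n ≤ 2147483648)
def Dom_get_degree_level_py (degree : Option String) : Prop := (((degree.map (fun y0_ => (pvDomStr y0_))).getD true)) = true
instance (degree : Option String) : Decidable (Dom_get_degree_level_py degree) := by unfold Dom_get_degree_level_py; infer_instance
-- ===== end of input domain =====

-- B replaces A's short-circuiting elif ladder by one flat (term, level) table, a comprehension
-- collecting all matching levels, and a max reduction with default 0 (objective: simpler).

-- ===== PORT A =====
def get_degree_level_py (degree : Option String) : Int :=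
  match degree with
  | none => 0
  | some d =>
    if d = "" then 0
    else
      let degree_lower := PySem.Str.lower d
      if (["phd", "ph.d", "doctorate", "d.phil"].any fun term => PySem.Str.isIn term degree_lower) then 4
      else if (["master", "m.s", "m.a", "mba", "m.tech"].any fun term => PySem.Str.isIn term degree_lower) then 3
      else if (["bachelor", "b.s", "b.a", "b.tech", "b.e"].any fun term => PySem.Str.isIn term degree_lower) then 2
      else if (["associate", "diploma"].any fun term => PySem.Str.isIn term degree_lower) then 1
      else 0

-- ===== PORT B =====
def pvDegreeLevels : List (String × Int) :=
  [("phd", 4), ("ph.d", 4), ("doctorate", 4), ("d.phil", 4),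
   ("master", 3), ("m.s", 3), ("m.a", 3), ("mba", 3), ("m.tech", 3),
   ("bachelor", 2), ("b.s", 2), ("b.a", 2), ("b.tech", 2), ("b.e", 2),
   ("associate", 1), ("diploma", 1)]

def get_degree_level_py_alt (degree : Option String) : Int :=
  match degree with
  | none => 0
  | some d =>
    if d = "" then 0
    else
      let degree_lower := PySem.Str.lower d
      let levels := (pvDegreeLevels.filter fun p => PySem.Str.isIn p.1 degree_lower).map (·.2)
      (PySem.List.max? levels (fun y => y)).getD 0

-- ===== PRECONDITION & SPEC =====
def Spec_get_degree_level_py (degree : Option String) (out : Int) : Prop := out = get_degree_level_py_alt degree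
instance (degree : Option String) (out : Int) : Decidable (Spec_get_degree_level_py degree out) := by unfold Spec_get_degree_level_py; infer_instance

-- ===== CLAIM (what is proved, stated in full; the proofs are below) =====
def Claim_equal_get_degree_level_py : Prop := ∀ (degree : Option String), Dom_get_degree_level_py degree → Spec_get_degree_level_py degree (get_degree_level_py degree)

-- ===== LEMMAS AND PROOFS =====

-- max(xs, default=0) is the running-max fold from 0 when all elements are nonnegative
lemma maxD_eq_foldl (xs : List Int) (h : ∀ y ∈ xs, 0 ≤ y) :
    (PySem.List.max? xs (fun y => y)).getD 0 = xs.foldl max 0 := by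
  cases xs with
  | nil => simp [PySem.List.max?]
  | cons x t =>
    rw [PySem.List.max?_id_cons]
    have hx : max 0 x = x := max_eq_right (h x (List.mem_cons_self))
    simp [List.foldl_cons, hx]

-- the filtered-levels fold over a constant-level group collapses to an 'if any' step
lemma foldl_max_group (L : Int) (ts : List String) (dl : String) (a : Int) :
    ((((ts.map (fun t => (t, L))).filter fun p => PySem.Str.isIn p.1 dl).map (·.2)).foldl max a)
      = if (ts.any fun t => PySem.Str.isIn t dl) then max a L else a := by
  induction ts generalizing a with
  | nil => simp
  | cons t ts ih =>
    simp only [List.map_cons, List.filter_cons, List.any_cons]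
    by_cases h : PySem.Str.isIn t dl = true
    · rw [if_pos h, List.map_cons, List.foldl_cons, ih]
      have hc : (PySem.Str.isIn t dl || ts.any fun t => PySem.Str.isIn t dl) = true := by
        rw [h]; rfl
      rw [if_pos hc]
      by_cases h2 : (ts.any fun t => PySem.Str.isIn t dl) = true
      · rw [if_pos h2, max_assoc, max_self]
      · rw [if_neg h2]
    · rw [if_neg h, ih]
      have hb : PySem.Str.isIn t dl = false := by
        revert h; cases PySem.Str.isIn t dl <;> simp
      simp only [hb, Bool.false_or]

lemma ladder_eq_max (t4 t3 t2 t1 : Bool) :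
    (if t4 then (4:Int) else if t3 then 3 else if t2 then 2 else if t1 then 1 else 0)
      = (if t1 then max (if t2 then max (if t3 then max (if t4 then max 0 4 else 0) 3
          else (if t4 then max 0 4 else 0)) 2 else (if t3 then max (if t4 then max 0 4 else 0) 3
          else (if t4 then max 0 4 else 0))) 1 else (if t2 then max (if t3 then max
          (if t4 then max 0 4 else 0) 3 else (if t4 then max 0 4 else 0)) 2
          else (if t3 then max (if t4 then max 0 4 else 0) 3 else (if t4 then max 0 4 else 0)))) := by
  cases t4 <;> cases t3 <;> cases t2 <;> cases t1 <;> decide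

-- ===== VERDICT (by name: the statement is the Claim_ definition above) =====
theorem get_degree_level_py_spec : Claim_equal_get_degree_level_py := by
  intro degree _
  show get_degree_level_py degree = get_degree_level_py_alt degree
  cases degree with
  | none => rfl
  | some d =>
    by_cases hd : d = ""
    · simp [get_degree_level_py, get_degree_level_py_alt, hd]
    · unfold get_degree_level_py get_degree_level_py_alt
      simp only [hd, if_false]
      set dl := PySem.Str.lower d with hdl
      have hpos : ∀ y ∈ ((pvDegreeLevels.filter fun p => PySem.Str.isIn p.1 dl).map (·.2)), (0:Int) ≤ y := by
        intro y hy
        simp only [List.mem_map, List.mem_filter] at hy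
        obtain ⟨p, ⟨hp, _⟩, rfl⟩ := hy
        have hall : ∀ p ∈ pvDegreeLevels, (0:Int) ≤ p.2 := by decide
        exact hall p hp
      rw [maxD_eq_foldl _ hpos]
      have htab : pvDegreeLevels
          = (["phd", "ph.d", "doctorate", "d.phil"].map (fun t => (t, (4:Int))))
            ++ (["master", "m.s", "m.a", "mba", "m.tech"].map (fun t => (t, (3:Int))))
            ++ (["bachelor", "b.s", "b.a", "b.tech", "b.e"].map (fun t => (t, (2:Int))))
            ++ (["associate", "diploma"].map (fun t => (t, (1:Int)))) := by rfl
      rw [htab]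
      simp only [List.filter_append, List.map_append, List.foldl_append]
      rw [foldl_max_group, foldl_max_group, foldl_max_group, foldl_max_group]
      exact ladder_eq_max _ _ _ _
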